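-- pv_equiv track=rewrite | github.com/munyuhuwa/kana-analyzer | mora-based/ReComposer.py | composeReFromWordList
-- ===== SOURCE A (Python) =====
-- class Trie:
-- 	def __init__(self, keySegment) -> None:
-- 		self.keySegment = keySegment
-- 		self.children = dict()
-- 		self.value = None
--
-- 	def addWord(self, key, value):
-- 		if not isinstance(key, str):
-- 			raise TypeError('')
-- 		keySegments = list(key)
-- 		self.addWordByKeySegments(keySegments, value)
--
-- 	def addWordByKeySegments(self, keySegments, value):
-- 		if len(keySegments) == 0:
-- 			self.value = value
-- 			return
-- 		if not (keySegments[0] in self.children):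
-- 			child = Trie(keySegments[0])
-- 			self.children[keySegments[0]] = child
-- 		self.children[keySegments[0]].addWordByKeySegments(keySegments[1:], value)
-- 		return
--
-- 	# def iter(self, keySegments):
-- 	# 	appendedKeySegments = keySegments + [self.value,]
-- 	# 	if not(self.value is None):
-- 	# 		key = ''.join(appendedKeySegments)
-- 	# 		yield key
-- 	# 	for _, child in self.children:
-- 	# 		child.iter(appendedKeySegments)
--
-- 	def makeRe(self):
-- 		if not (self.keySegment is None):
-- 			re_text = '' + self.keySegment
-- 		if len(self.children) == 0:
-- 			return re_text
-- 		child_re_texts = [child.makeRe() for child in self.children.values()]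
-- 		re_text += '(' + '|'.join(child_re_texts) + ')'
-- 		if not (self.value is None):
-- 			re_text += '?'
-- 		return re_text
--
-- def composeReFromWordList(wordList):
-- 	if not isinstance(wordList, list):
-- 		raise TypeError('')
-- 	if not all([isinstance(word, str) for word in wordList]):
-- 		raise TypeError('')
-- 	tree = Trie('')
-- 	for word in wordList:
-- 		tree.addWord(word, True)
-- 	return tree.makeRe()
-- ===== SOURCE B (Python) =====
-- def composeReFromWordList(wordList):
-- 	if not isinstance(wordList, list):
-- 		raise TypeError('')
-- 	if not all([isinstance(word, str) for word in wordList]):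
-- 		raise TypeError('')
-- 	words = [list(w) for w in wordList]
-- 	return _build('', words)
--
-- def _build(segment, words):
-- 	has_value = any(len(w) == 0 for w in words)
-- 	rest = [w for w in words if w]
-- 	parts = []
-- 	while rest:
-- 		c = rest[0][0]
-- 		parts.append(_build(c, [w[1:] for w in rest if w[0] == c]))
-- 		rest = [w for w in rest if w[0] != c]
-- 	if not parts:
-- 		return segment
-- 	return segment + '(' + '|'.join(parts) + ')' + ('?' if has_value else '')
-- ===== Notes on version B (the rewrite author's own statement) =====
-- stated objective: simpler
-- what changed: Removed the Trie class entirely: instead of building a trie node-by-node and then walking it with makeRe, B recursively partitions the word list by first character (first-appearance order) and emits the regex directly, fusing trie construction and traversal into one recursion.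
import Mathlib
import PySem

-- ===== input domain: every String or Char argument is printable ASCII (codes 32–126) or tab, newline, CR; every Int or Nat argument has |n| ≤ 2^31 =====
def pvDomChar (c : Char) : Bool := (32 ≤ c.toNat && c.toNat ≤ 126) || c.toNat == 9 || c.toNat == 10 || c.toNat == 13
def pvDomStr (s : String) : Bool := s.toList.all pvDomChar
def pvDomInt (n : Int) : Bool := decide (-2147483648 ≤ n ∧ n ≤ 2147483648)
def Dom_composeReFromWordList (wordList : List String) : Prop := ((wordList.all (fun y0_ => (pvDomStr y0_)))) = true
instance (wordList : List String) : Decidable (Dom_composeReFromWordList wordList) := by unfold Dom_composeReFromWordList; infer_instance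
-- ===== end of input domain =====

-- B replaces A's Trie class by one direct recursion that partitions the word list by first
-- character (objective: simpler — no intermediate tree data structure). Return values are
-- proved equal on all inputs; the TypeError guards of both Pythons fire on the same
-- non-list/non-str inputs, which are outside the List String type and not modelled here.

-- ===== PORT A =====
-- Trie: keySegment, children (insertion-ordered dict Char → Trie, as a mutual list type), value
mutual
inductive PTrie : Type
  | mk : String → PChildren → Option Bool → PTrie
inductive PChildren : Type
  | nil : PChildren
  | cons : Char → PTrie → PChildren → PChildren
end

-- addWordByKeySegments (value is always True); insertC is the dict step:
-- "if key absent append fresh child at end, then recurse into the child at the key"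
mutual
def insertT : PTrie → List Char → PTrie
  | .mk s ch _, [] => .mk s ch (some true)
  | .mk s ch v, c :: t => .mk s (insertC ch c t) v
  termination_by _tr t => (t.length, 0, 0)
def insertC : PChildren → Char → List Char → PChildren
  | .nil, c, t => .cons c (insertT (.mk (String.singleton c) .nil none) t) .nil
  | .cons c' tr rest, c, t =>
      if c' = c then .cons c' (insertT tr t) rest
      else .cons c' tr (insertC rest c t)
  termination_by ch _ t => (t.length, 1, sizeOf ch)
end

def isNilC : PChildren → Bool
  | .nil => true
  | .cons _ _ _ => false

-- Trie.makeRe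
mutual
def makeReT : PTrie → String
  | .mk s ch v =>
    let re := "" ++ s
    if isNilC ch then re
    else re ++ "(" ++ String.intercalate "|" (makeReList ch) ++ ")" ++
      (if v.isSome then "?" else "")
def makeReList : PChildren → List String
  | .nil => []
  | .cons _ tr rest => makeReT tr :: makeReList rest
end

def composeReFromWordList (wordList : List String) : String :=
  makeReT (wordList.foldl (fun tr w => insertT tr w.toList) (.mk "" .nil none))

-- ===== PORT B =====
def pvMeasure (ws : List (List Char)) : Nat := (ws.map (fun w => w.length + 1)).sum

theorem pvMeasure_filter_le (p : List Char → Bool) (l : List (List Char)) :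
    pvMeasure (l.filter p) ≤ pvMeasure l := by
  induction l with
  | nil => simp [pvMeasure]
  | cons w l ih =>
    simp only [List.filter_cons]
    by_cases h : p w = true <;> simp [h, pvMeasure, List.map_cons, List.sum_cons] at * <;> omega

theorem pvMeasure_mapTail_le (l : List (List Char)) :
    pvMeasure (l.map List.tail) ≤ pvMeasure l := by
  induction l with
  | nil => simp [pvMeasure]
  | cons w l ih =>
    have : w.tail.length ≤ w.length := by cases w <;> simp
    simp [pvMeasure, List.map_cons, List.sum_cons] at *
    omega

-- _build: collect has_value, drop empty words, run the while-loop over `rest`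
-- (modelled as the recursion buildParts: take the first word's head char, recurse on the
-- tails of all words sharing it, continue with the remaining words), then assemble the result
def finishRe (segment : String) (hasVal : Bool) (parts : List String) : String :=
  if parts.isEmpty then segment
  else segment ++ "(" ++ String.intercalate "|" parts ++ ")" ++
    (if hasVal then "?" else "")

mutual
def buildRe (segment : String) (words : List (List Char)) : String :=
  finishRe segment (words.any List.isEmpty)
    (buildParts (words.filter (fun w => ¬ w.isEmpty)))
  termination_by (2 * pvMeasure words + 1)
  decreasing_by
    have := pvMeasure_filter_le (fun w => ¬ w.isEmpty) words; omega
def buildParts : List (List Char) → List String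
  | [] => []
  | [] :: rest => buildParts rest   -- unreachable: `rest` only ever holds nonempty words
  | (c :: t) :: rest =>
      buildRe (String.singleton c)
          (t :: (rest.filter (fun w => w.head? = some c)).map List.tail)
        :: buildParts (rest.filter (fun w => ¬ w.head? = some c))
  termination_by ws => 2 * pvMeasure ws
  decreasing_by
    · simp only [pvMeasure, List.map_cons, List.sum_cons]; omega
    · have h1 := pvMeasure_mapTail_le (rest.filter (fun w => w.head? = some c))
      have h2 := pvMeasure_filter_le (fun w => w.head? = some c) rest
      simp only [pvMeasure, List.map_cons, List.sum_cons, List.length_cons] at *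
      omega
    · have h := pvMeasure_filter_le (fun w => ¬ w.head? = some c) rest
      simp only [pvMeasure, List.map_cons, List.sum_cons, List.length_cons] at *
      omega
end

def composeReFromWordList_alt (wordList : List String) : String :=
  buildRe "" (wordList.map (fun w => w.toList))

-- ===== PRECONDITION & SPEC =====
def Spec_composeReFromWordList (wordList : List String) (out : String) : Prop := out = composeReFromWordList_alt wordList
instance (wordList : List String) (out : String) : Decidable (Spec_composeReFromWordList wordList out) := by unfold Spec_composeReFromWordList; infer_instance

-- ===== CLAIM (what is proved, stated in full; the proofs are below) =====
def Claim_equal_composeReFromWordList : Prop := ∀ (wordList : List String), Dom_composeReFromWordList wordList → Spec_composeReFromWordList wordList (composeReFromWordList wordList)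

-- ===== LEMMAS AND PROOFS =====
def insertAll (tr : PTrie) (ws : List (List Char)) : PTrie := ws.foldl insertT tr

-- first-appearance grouping of words by head character (dict.setdefault semantics)
def addG : List (Char × List (List Char)) → Char → List Char → List (Char × List (List Char))
  | [], c, t => [(c, [t])]
  | (c', ts) :: gs, c, t =>
      if c' = c then (c', ts ++ [t]) :: gs else (c', ts) :: addG gs c t

def stepG (gs : List (Char × List (List Char))) (w : List Char) : List (Char × List (List Char)) :=
  match w with
  | [] => gs
  | c :: t => addG gs c t

def foldG (gs : List (Char × List (List Char))) (ws : List (List Char)) : List (Char × List (List Char)) :=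
  ws.foldl stepG gs

def fromGroups : List (Char × List (List Char)) → PChildren
  | [] => .nil
  | (c, ts) :: gs => .cons c (insertAll (.mk (String.singleton c) .nil none) ts) (fromGroups gs)

theorem insertAll_concat (tr : PTrie) (ws : List (List Char)) (w : List Char) :
    insertAll tr (ws ++ [w]) = insertT (insertAll tr ws) w := by
  simp [insertAll]

theorem insertC_fromGroups (gs : List (Char × List (List Char))) (c : Char) (t : List Char) :
    insertC (fromGroups gs) c t = fromGroups (addG gs c t) := by
  induction gs with
  | nil => simp [fromGroups, insertC, addG, insertAll]
  | cons g gs ih =>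
    obtain ⟨c', ts⟩ := g
    by_cases h : c' = c
    · subst h
      simp [fromGroups, insertC, addG, insertAll_concat]
    · simp [fromGroups, insertC, addG, h, ih]

theorem insertAll_struct (ws : List (List Char)) (seg : String)
    (gs : List (Char × List (List Char))) (v : Option Bool) :
    insertAll (.mk seg (fromGroups gs) v) ws =
      .mk seg (fromGroups (foldG gs ws)) (if ws.any List.isEmpty then some true else v) := by
  induction ws generalizing gs v with
  | nil => simp [insertAll, foldG]
  | cons w ws ih =>
    cases w with
    | nil =>
      have h1 : insertAll (.mk seg (fromGroups gs) v) ([] :: ws)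
          = insertAll (.mk seg (fromGroups gs) (some true)) ws := by
        simp [insertAll, List.foldl_cons, insertT]
      rw [h1, ih]
      simp [foldG, stepG, List.foldl_cons]
    | cons c t =>
      have h1 : insertAll (.mk seg (fromGroups gs) v) ((c :: t) :: ws)
          = insertAll (.mk seg (fromGroups (addG gs c t)) v) ws := by
        simp [insertAll, List.foldl_cons, insertT, insertC_fromGroups]
      rw [h1, ih]
      simp [foldG, stepG, List.foldl_cons]

theorem foldG_peel (ws : List (List Char)) (c : Char) (ts : List (List Char))
    (gs : List (Char × List (List Char))) :
    foldG ((c, ts) :: gs) ws =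
      (c, ts ++ (ws.filter (fun w => w.head? = some c)).map List.tail) ::
        foldG gs (ws.filter (fun w => ¬ w.head? = some c)) := by
  induction ws generalizing ts gs with
  | nil => simp [foldG]
  | cons w ws ih =>
    cases w with
    | nil =>
      have h1 : foldG ((c, ts) :: gs) ([] :: ws) = foldG ((c, ts) :: gs) ws := by
        simp [foldG, List.foldl_cons, stepG]
      rw [h1, ih]
      simp [foldG, stepG, List.foldl_cons]
    | cons c0 t =>
      by_cases h : c0 = c
      · subst h
        have h1 : foldG ((c0, ts) :: gs) ((c0 :: t) :: ws)
            = foldG ((c0, ts ++ [t]) :: gs) ws := by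
          simp [foldG, List.foldl_cons, stepG, addG]
        rw [h1, ih]
        simp [List.append_assoc]
      · have h1 : foldG ((c, ts) :: gs) ((c0 :: t) :: ws)
            = foldG ((c, ts) :: addG gs c0 t) ws := by
          simp [foldG, List.foldl_cons, stepG, addG, Ne.symm h]
        rw [h1, ih]
        simp [h, foldG, List.foldl_cons, stepG]

theorem foldG_filter_empty (ws : List (List Char)) (gs : List (Char × List (List Char))) :
    foldG gs (ws.filter (fun w => ¬ w.isEmpty)) = foldG gs ws := by
  induction ws generalizing gs with
  | nil => rfl
  | cons w ws ih =>
    cases w with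
    | nil => simpa [List.filter_cons, foldG, stepG, List.foldl_cons] using ih gs
    | cons c t =>
      simp only [List.filter_cons]
      simpa [foldG, List.foldl_cons, stepG] using ih (addG gs c t)

theorem buildParts_eq (n : Nat) (ws : List (List Char)) (hn : ws.length ≤ n) :
    buildParts ws = (foldG [] ws).map (fun p => buildRe (String.singleton p.1) p.2) := by
  induction n generalizing ws with
  | zero =>
    have : ws = [] := List.eq_nil_of_length_eq_zero (Nat.le_zero.mp hn)
    subst this; simp [buildParts, foldG]
  | succ n ih =>
    cases ws with
    | nil => simp [buildParts, foldG]
    | cons w ws =>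
      cases w with
      | nil =>
        have h1 : foldG ([] : List (Char × List (List Char))) ([] :: ws) = foldG [] ws := by
          simp [foldG, List.foldl_cons, stepG]
        rw [buildParts, ih ws (by simpa using Nat.le_of_succ_le_succ hn), h1]
      | cons c t =>
        have h1 : foldG ([] : List (Char × List (List Char))) ((c :: t) :: ws)
            = foldG [(c, [t])] ws := by
          simp [foldG, List.foldl_cons, stepG, addG]
        rw [buildParts, h1, foldG_peel]
        have hlen : (ws.filter (fun w => ¬ w.head? = some c)).length ≤ n := by
          have := List.length_filter_le (fun w => ¬ w.head? = some c) ws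
          have := Nat.le_of_succ_le_succ hn
          simp at *; omega
        rw [ih _ hlen]
        simp

theorem makeReList_fromGroups (gs : List (Char × List (List Char))) :
    makeReList (fromGroups gs) =
      gs.map (fun p => makeReT (insertAll (.mk (String.singleton p.1) .nil none) p.2)) := by
  induction gs with
  | nil => rfl
  | cons g gs ih => obtain ⟨c, ts⟩ := g; simp [fromGroups, makeReList, ih]

theorem mem_foldG_measure (n : Nat) (ws : List (List Char)) (c : Char)
    (ts : List (List Char)) (hn : ws.length ≤ n) (hmem : (c, ts) ∈ foldG [] ws) :
    pvMeasure ts < pvMeasure ws := by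
  induction n generalizing ws c ts with
  | zero =>
    have : ws = [] := List.eq_nil_of_length_eq_zero (Nat.le_zero.mp hn)
    subst this; simp [foldG] at hmem
  | succ n ih =>
    cases ws with
    | nil => simp [foldG] at hmem
    | cons w ws =>
      cases w with
      | nil =>
        have h1 : foldG ([] : List (Char × List (List Char))) ([] :: ws) = foldG [] ws := by
          simp [foldG, List.foldl_cons, stepG]
        rw [h1] at hmem
        have := ih ws c ts (by simpa using Nat.le_of_succ_le_succ hn) hmem
        simp [pvMeasure, List.map_cons, List.sum_cons] at *
        omega
      | cons c0 t =>
        have h1 : foldG ([] : List (Char × List (List Char))) ((c0 :: t) :: ws)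
            = foldG [(c0, [t])] ws := by
          simp [foldG, List.foldl_cons, stepG, addG]
        rw [h1, foldG_peel] at hmem
        rcases List.mem_cons.mp hmem with h | h
        · have hts : ts = [t] ++ (ws.filter (fun w => w.head? = some c0)).map List.tail := by
            have := congrArg Prod.snd h; simpa using this
          subst hts
          have h2 := pvMeasure_mapTail_le (ws.filter (fun w => w.head? = some c0))
          have h3 := pvMeasure_filter_le (fun w => w.head? = some c0) ws
          simp only [pvMeasure, List.map_cons, List.sum_cons, List.map_append,
            List.sum_append, List.length_cons, List.map_nil,
            List.sum_nil] at *
          omega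
        · have hlen : (ws.filter (fun w => ¬ w.head? = some c0)).length ≤ n := by
            have := List.length_filter_le (fun w => ¬ w.head? = some c0) ws
            have := Nat.le_of_succ_le_succ hn
            simp at *; omega
          have h2 := ih _ c ts hlen h
          have h3 := pvMeasure_filter_le (fun w => ¬ w.head? = some c0) ws
          simp only [pvMeasure, List.map_cons, List.sum_cons, List.length_cons] at *
          omega

theorem isNilC_fromGroups (gs : List (Char × List (List Char))) :
    isNilC (fromGroups gs) = gs.isEmpty := by
  cases gs with
  | nil => rfl
  | cons g gs => obtain ⟨c, ts⟩ := g; rfl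

theorem main_eq (n : Nat) (ws : List (List Char)) (hn : pvMeasure ws ≤ n) (seg : String) :
    makeReT (insertAll (.mk seg .nil none) ws) = buildRe seg ws := by
  induction n generalizing ws seg with
  | zero =>
    have : ws = [] := by
      cases ws with
      | nil => rfl
      | cons w ws => simp [pvMeasure, List.map_cons, List.sum_cons] at hn
    subst this
    show makeReT (.mk seg .nil none) = buildRe seg []
    rw [buildRe]
    simp [makeReT, isNilC, finishRe, buildParts]
  | succ n ih =>
    have hroot : insertAll (.mk seg .nil none) ws
        = .mk seg (fromGroups (foldG [] ws))
            (if ws.any List.isEmpty then some true else none) := by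
      have := insertAll_struct ws seg [] none
      simpa [fromGroups] using this
    have hparts : buildParts (ws.filter (fun w => ¬ w.isEmpty))
        = (foldG [] ws).map (fun p => buildRe (String.singleton p.1) p.2) := by
      rw [buildParts_eq (ws.filter (fun w => ¬ w.isEmpty)).length _ le_rfl,
        foldG_filter_empty]
    have hmap : ∀ p ∈ foldG [] ws,
        makeReT (insertAll (.mk (String.singleton p.1) .nil none) p.2)
          = buildRe (String.singleton p.1) p.2 := by
      intro p hp
      obtain ⟨c, ts⟩ := p
      have hlt := mem_foldG_measure ws.length ws c ts le_rfl hp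
      exact ih ts (by omega) (String.singleton c)
    rw [hroot, buildRe]
    cases hG : foldG [] ws with
    | nil =>
      rw [makeReT, finishRe]
      simp only [hG, fromGroups, isNilC, if_pos, hparts, List.map_nil, List.isEmpty_nil]
      simp
    | cons g gs =>
      rw [makeReT]
      simp only [isNilC_fromGroups, List.isEmpty_cons, makeReList_fromGroups]
      have hml : (g :: gs).map
            (fun p => makeReT (insertAll (.mk (String.singleton p.1) .nil none) p.2))
          = (g :: gs).map (fun p => buildRe (String.singleton p.1) p.2) := by
        apply List.map_congr_left
        intro p hp
        exact hmap p (hG ▸ hp)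
      rw [hml, finishRe]
      simp only [hparts, hG, List.map_cons, List.isEmpty_cons]
      cases hv : ws.any List.isEmpty <;> simp

-- ===== VERDICT (by name: the statement is the Claim_ definition above) =====
theorem composeReFromWordList_spec : Claim_equal_composeReFromWordList := by
  intro wordList _dom
  show composeReFromWordList wordList = composeReFromWordList_alt wordList
  unfold composeReFromWordList composeReFromWordList_alt
  have h1 : wordList.foldl (fun tr w => insertT tr w.toList) (.mk "" .nil none)
      = insertAll (.mk "" .nil none) (wordList.map (fun w => w.toList)) := by
    simp [insertAll, List.foldl_map]
  rw [h1]
  exact main_eq (pvMeasure (wordList.map (fun w => w.toList))) _ le_rfl ""
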